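-- pv_equiv track=rewrite | github.com/LibraM9/yidong_AIIA | fusai/nfm.py | word_fre
-- ===== SOURCE A (Python) =====
-- from collections import Counter
--
-- def word_fre(x):
--     word_dict = []
--     x = x.split('|')
--     docs = []
--     for doc in x:
--         doc = doc.split()
--         docs.append(doc)
--         word_dict.extend(doc)
--     word_dict = Counter(word_dict)
--     new_word_dict = {}
--     for key,value in word_dict.items():
--         new_word_dict[key] = [value,0]
--     del word_dict
--     del x
--     for doc in docs:
--         doc = Counter(doc)
--         for word in doc.keys():
--             new_word_dict[word][1] += 1
--     return new_word_dict
-- ===== SOURCE B (Python) =====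
-- def word_fre(x):
--     freq = {}
--     for doc in x.split('|'):
--         seen = set()
--         for w in doc.split():
--             if w not in freq:
--                 freq[w] = [0, 0]
--             freq[w][0] += 1
--             if w not in seen:
--                 freq[w][1] += 1
--                 seen.add(w)
--     return freq
-- ===== Notes on version B (the rewrite author's own statement) =====
-- stated objective: simpler
-- what changed: Replaces A's three passes (token-list extension, a global Counter copied into a dict, then a per-doc Counter pass for document frequency) by one fused pass that builds the result dict directly, tracking first occurrence per document with a set.
import Mathlib
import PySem

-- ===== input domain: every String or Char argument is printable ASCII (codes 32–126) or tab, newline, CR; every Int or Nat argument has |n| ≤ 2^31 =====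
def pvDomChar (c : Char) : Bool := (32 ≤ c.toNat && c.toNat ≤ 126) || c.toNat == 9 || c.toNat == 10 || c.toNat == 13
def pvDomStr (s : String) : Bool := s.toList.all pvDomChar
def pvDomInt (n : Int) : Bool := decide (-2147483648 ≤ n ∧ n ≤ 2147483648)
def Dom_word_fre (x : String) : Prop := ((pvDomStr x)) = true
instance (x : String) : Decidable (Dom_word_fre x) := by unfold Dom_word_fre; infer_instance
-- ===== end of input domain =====

-- B fuses A's three passes (token list + global Counter copied into a dict + per-doc Counter pass)
-- into one pass over the token stream with a per-document seen-set; same result, simpler.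


-- ===== PORT A =====
-- shared helper: the Python statement  d[w][i] += 1  (the key is always present where this is
-- used, so the none branch — Python's KeyError — is unreachable)
def wfBump (d : PySem.Dict String (List Int)) (w : String) (i : Int) : PySem.Dict String (List Int) :=
  match d.get? w with
  | some v => d.insert w (PySem.List.pySetD v i (PySem.List.pyGetD v i 0 + 1))
  | none => d

def word_fre (x : String) : List (String × List Int) :=
  -- x = x.split('|')   (the separator is the non-empty literal '|', so split? is never none)
  let parts : List String := (PySem.Str.split? x "|").getD []
  -- first loop: doc = doc.split(); docs.append(doc); word_dict.extend(doc)
  let acc := parts.foldl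
    (fun (p : List (List String) × List String) part =>
      let doc := PySem.Str.split₀ part
      (p.1 ++ [doc], p.2 ++ doc)) ([], [])
  let docs := acc.1
  -- word_dict = Counter(word_dict)
  let wd := PySem.Dict.counter acc.2
  -- second loop: new_word_dict[key] = [value, 0]
  let nwd := wd.items.foldl
    (fun (d : PySem.Dict String (List Int)) kv => d.insert kv.1 [kv.2, 0]) PySem.Dict.empty
  -- third loop: for doc in docs: for word in Counter(doc).keys(): new_word_dict[word][1] += 1
  let final := docs.foldl
    (fun d doc => (PySem.Dict.counter doc).keys.foldl (fun d w => wfBump d w 1) d) nwd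
  final.items

-- ===== PORT B =====
def word_fre_alt (x : String) : List (String × List Int) :=
  (((PySem.Str.split? x "|").getD []).foldl
    (fun (freq : PySem.Dict String (List Int)) part =>
      ((PySem.Str.split₀ part).foldl
        (fun (p : PySem.Dict String (List Int) × PySem.Set String) w =>
          let d0 := if p.1.contains w then p.1 else p.1.insert w [0, 0]
          let d1 := wfBump d0 w 0
          if p.2.contains w then (d1, p.2)
          else (wfBump d1 w 1, PySem.Set.add p.2 w))
        (freq, PySem.Set.empty)).1)
    PySem.Dict.empty).items

-- ===== PRECONDITION & SPEC =====
def Spec_word_fre (x : String) (out : List (String × List Int)) : Prop := out = word_fre_alt x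
instance (x : String) (out : List (String × List Int)) : Decidable (Spec_word_fre x out) := by unfold Spec_word_fre; infer_instance

-- ===== CLAIM (what is proved, stated in full; the proofs are below) =====
def Claim_equal_word_fre : Prop := ∀ (x : String), Dom_word_fre x → Spec_word_fre x (word_fre x)

-- ===== LEMMAS AND PROOFS =====

-- Proof-side names for the two loop bodies (definitionally the lambdas of the ports).
def wfStepB (p : PySem.Dict String (List Int) × PySem.Set String) (w : String) :
    PySem.Dict String (List Int) × PySem.Set String :=
  let d0 := if p.1.contains w then p.1 else p.1.insert w [0, 0]
  let d1 := wfBump d0 w 0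
  if p.2.contains w then (d1, p.2)
  else (wfBump d1 w 1, PySem.Set.add p.2 w)

def wfDocB (freq : PySem.Dict String (List Int)) (ws : List String) :
    PySem.Dict String (List Int) :=
  (ws.foldl wfStepB (freq, PySem.Set.empty)).1

def wfInit (toks : List String) : PySem.Dict String (List Int) :=
  (PySem.Dict.counter toks).items.foldl
    (fun (d : PySem.Dict String (List Int)) kv => d.insert kv.1 [kv.2, 0]) PySem.Dict.empty

def wfDocA (d : PySem.Dict String (List Int)) (doc : List String) :
    PySem.Dict String (List Int) :=
  (PySem.Dict.counter doc).keys.foldl (fun d w => wfBump d w 1) d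

-- the paired first loop of A computes (map split₀, flatten of that)
theorem wf_firstloop (parts : List String) (ds : List (List String)) (ws : List String) :
    parts.foldl
      (fun (p : List (List String) × List String) part =>
        let doc := PySem.Str.split₀ part
        (p.1 ++ [doc], p.2 ++ doc)) (ds, ws)
    = (ds ++ parts.map PySem.Str.split₀, ws ++ (parts.map PySem.Str.split₀).flatten) := by
  induction parts generalizing ds ws with
  | nil => simp
  | cons p ps ih => simp [ih, List.append_assoc]

-- wfBump at w, looked up anywhere
theorem get?_wfBump (d : PySem.Dict String (List Int)) (w : String) (i : Int) (k : String) :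
    (wfBump d w i).get? k
    = if k = w then (d.get? w).map (fun v => PySem.List.pySetD v i (PySem.List.pyGetD v i 0 + 1))
      else d.get? k := by
  unfold wfBump
  cases h : d.get? w with
  | none => split_ifs with hk <;> simp [hk, h]
  | some v => rw [PySem.Dict.get?_insert]; split_ifs <;> simp [*]

theorem keys_wfBump (d : PySem.Dict String (List Int)) (w : String) (i : Int) :
    (wfBump d w i).keys = d.keys := by
  unfold wfBump
  cases h : d.get? w with
  | none => rfl
  | some v =>
      exact PySem.Dict.keys_insert_of_contains d _ (by rw [PySem.Dict.contains_eq_isSome_get?, h]; rfl)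

-- a fold of wfBump over a Nodup word list bumps each present key once
theorem get?_foldl_wfBump (ws : List String) (hnd : ws.Nodup) (i : Int)
    (d : PySem.Dict String (List Int)) (k : String) :
    (ws.foldl (fun d w => wfBump d w i) d).get? k
    = if k ∈ ws then (d.get? k).map (fun v => PySem.List.pySetD v i (PySem.List.pyGetD v i 0 + 1))
      else d.get? k := by
  induction ws generalizing d with
  | nil => simp
  | cons w ws ih =>
      simp only [List.nodup_cons] at hnd
      simp only [List.foldl_cons, ih hnd.2]
      by_cases hk : k = w
      · subst hk
        simp [hnd.1, get?_wfBump]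
      · simp [get?_wfBump, hk, List.mem_cons]

theorem keys_foldl_wfBump (ws : List String) (i : Int) (d : PySem.Dict String (List Int)) :
    (ws.foldl (fun d w => wfBump d w i) d).keys = d.keys := by
  induction ws generalizing d with
  | nil => rfl
  | cons w ws ih => simp [ih, keys_wfBump]

-- arithmetic on the two-element value lists
theorem bump_pair (a b : Int) (i : Int) (h : i = 0 ∨ i = 1) :
    PySem.List.pySetD [a, b] i (PySem.List.pyGetD [a, b] i 0 + 1)
    = if i = 0 then [a + 1, b] else [a, b + 1] := by
  rcases h with h | h <;> subst h <;> rfl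

theorem bump_pair0 (a b : Int) :
    PySem.List.pySetD [a, b] 0 (PySem.List.pyGetD [a, b] 0 0 + 1) = [a + 1, b] := rfl

theorem bump_pair1 (a b : Int) :
    PySem.List.pySetD [a, b] 1 (PySem.List.pyGetD [a, b] 1 0 + 1) = [a, b + 1] := rfl

-- extending a token list by one word: Set.ofList bookkeeping
theorem ofList_append_mem {l : List String} {w : String} (h : w ∈ l) :
    PySem.Set.ofList (l ++ [w]) = PySem.Set.ofList l := by
  simp [PySem.Set.ofList_eq_foldl, PySem.Set.add, PySem.Set.contains]
  rw [← PySem.Set.ofList_eq_foldl]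
  simp [PySem.Set.mem_ofList, h]

theorem ofList_append_not_mem {l : List String} {w : String} (h : w ∉ l) :
    PySem.Set.ofList (l ++ [w]) = PySem.Set.ofList l ++ [w] := by
  simp [PySem.Set.ofList_eq_foldl, PySem.Set.add, PySem.Set.contains]
  rw [← PySem.Set.ofList_eq_foldl]
  simp [PySem.Set.mem_ofList, h]

theorem ofList_append_one (l : List String) (w : String) :
    PySem.Set.ofList (l ++ [w]) = PySem.Set.add (PySem.Set.ofList l) w := by
  simp [PySem.Set.ofList_eq_foldl]

-- the invariant value at the word just processed, and at any other word
theorem wf_at_w (pre pfx : List String) (w : String) (b : String → Int) :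
    (if w ∈ pre ++ (pfx ++ [w])
      then some [((pre ++ (pfx ++ [w])).count w : Int), b w + if w ∈ pfx ++ [w] then 1 else 0]
      else none)
    = some [((pre ++ pfx).count w : Int) + 1, b w + 1] := by
  rw [if_pos (by simp : w ∈ pre ++ (pfx ++ [w]))]
  have h2 : (if w ∈ pfx ++ [w] then (1 : Int) else 0) = 1 := by simp
  have hc : List.count w (pre ++ (pfx ++ [w])) = List.count w (pre ++ pfx) + 1 := by
    simp [List.count_append]
    try omega
  rw [h2, hc]
  push_cast
  rfl

theorem wf_shift_ne (pre pfx : List String) (w j : String) (hj : j ≠ w) (b : String → Int) :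
    (if j ∈ pre ++ pfx
      then some [((pre ++ pfx).count j : Int), b j + if j ∈ pfx then 1 else 0] else none)
    = (if j ∈ pre ++ (pfx ++ [w])
      then some [((pre ++ (pfx ++ [w])).count j : Int), b j + if j ∈ pfx ++ [w] then 1 else 0]
      else none) := by
  have hm : (j ∈ pre ++ (pfx ++ [w])) ↔ j ∈ pre ++ pfx := by simp [hj]
  have hm2 : (j ∈ pfx ++ [w]) ↔ j ∈ pfx := by simp [hj]
  have hw0 : List.count j [w] = 0 := by
    rw [List.count_eq_zero]
    simp [hj]
  have hc : List.count j (pre ++ (pfx ++ [w])) = List.count j (pre ++ pfx) := by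
    simp [List.count_append, hw0]
  by_cases hjP : j ∈ pre ++ pfx
  · rw [if_pos hjP, if_pos (hm.mpr hjP), hc]
    by_cases hjf : j ∈ pfx
    · rw [if_pos hjf, if_pos (hm2.mpr hjf)]
    · rw [if_neg hjf, if_neg (fun h => hjf (hm2.mp h))]
  · rw [if_neg hjP, if_neg (fun h => hjP (hm.mp h))]

-- characterisation of A's initial dict nwd
theorem wf_init_items (toks : List String) :
    (wfInit toks).items
      = (PySem.Set.ofList toks).map (fun k => (k, ([(toks.count k : Int), 0] : List Int))) := by
  unfold wfInit
  rw [PySem.Dict.items_foldl_insert_fresh _ Prod.fst (fun kv => [kv.2, 0]) _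
      (by intro a _; simp [PySem.Dict.contains_empty])
      (by
        have : ((PySem.Dict.counter toks).items.map Prod.fst) = (PySem.Dict.counter toks).keys := rfl
        rw [this, PySem.Dict.keys_counter]; exact PySem.Set.nodup_ofList toks)]
  simp [PySem.Dict.items_counter, List.map_map, Function.comp_def, PySem.Dict.empty]

theorem wf_init_keys (toks : List String) :
    (wfInit toks).keys = PySem.Set.ofList toks := by
  show (wfInit toks).items.map Prod.fst = _
  rw [wf_init_items]
  simp [List.map_map, Function.comp_def]

theorem wf_init_get? (toks : List String) (k : String) :
    (wfInit toks).get? k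
      = if k ∈ toks then some [(toks.count k : Int), 0] else none := by
  by_cases h : k ∈ toks
  · rw [if_pos h]
    apply PySem.Dict.get?_of_mem_items
    · rw [wf_init_items]
      exact List.mem_map.mpr ⟨k, (PySem.Set.mem_ofList toks k).mpr h, rfl⟩
    · rw [wf_init_keys]; exact PySem.Set.nodup_ofList toks
  · rw [if_neg h, PySem.Dict.get?_eq_none_iff_not_mem_keys, wf_init_keys]
    simpa [PySem.Set.mem_ofList] using h

-- A's third loop over docs, abstractly
theorem wf_A_outer (docs : List (List String)) (all : List String)
    (hsub : ∀ doc ∈ docs, ∀ w ∈ doc, w ∈ all)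
    (c : String → Int) (b : String → Int) (d : PySem.Dict String (List Int))
    (hd : ∀ k, d.get? k = if k ∈ all then some [c k, b k] else none) (k : String) :
    (docs.foldl wfDocA d).get? k
    = if k ∈ all then some [c k, b k + (docs.countP (fun doc => decide (k ∈ doc)) : Int)] else none := by
  induction docs generalizing d b with
  | nil => simp [hd]
  | cons doc rest ih =>
      simp only [List.foldl_cons]
      rw [ih (fun doc h => hsub doc (List.mem_cons_of_mem _ h))
          (b := fun k => b k + if k ∈ doc then 1 else 0)
          (d := wfDocA d doc)
          (hd := by
            intro j
            unfold wfDocA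
            rw [PySem.Dict.keys_counter, get?_foldl_wfBump _ (PySem.Set.nodup_ofList doc) 1 d j,
                hd j]
            by_cases hj : j ∈ doc
            · have hja : j ∈ all := hsub doc List.mem_cons_self j hj
              simp [PySem.Set.mem_ofList, hj, hja, bump_pair]
            · simp [PySem.Set.mem_ofList, hj])]
      by_cases hk : k ∈ all
      · simp only [hk, if_true, List.countP_cons]
        have : ((List.countP (fun doc => decide (k ∈ doc)) rest
              + if decide (k ∈ doc) = true then 1 else 0 : Nat) : Int)
            = (List.countP (fun doc => decide (k ∈ doc)) rest : Int)
              + if k ∈ doc then 1 else 0 := by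
          by_cases hkd : k ∈ doc <;> simp [hkd]
        rw [this]; ring_nf
      · simp [hk]

theorem keys_wfDocA (d : PySem.Dict String (List Int)) (doc : List String) :
    (wfDocA d doc).keys = d.keys := by
  unfold wfDocA; rw [keys_foldl_wfBump]

theorem keys_A_outer (docs : List (List String)) (d : PySem.Dict String (List Int)) :
    (docs.foldl wfDocA d).keys = d.keys := by
  induction docs generalizing d with
  | nil => rfl
  | cons doc rest ih => simp [ih, keys_wfDocA]

-- B's inner per-document loop, abstractly:
-- pre = tokens of earlier documents, pfx = tokens already processed in this document
theorem wf_B_inner (ws : List String) (pre : List String) (b : String → Int)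
    (hb0 : ∀ j, j ∉ pre → b j = 0)
    (pfx : List String)
    (d : PySem.Dict String (List Int))
    (hd : ∀ j, d.get? j = if j ∈ pre ++ pfx
        then some [((pre ++ pfx).count j : Int), b j + if j ∈ pfx then 1 else 0] else none)
    (hk : d.keys = PySem.Set.ofList (pre ++ pfx))
    (seen : PySem.Set String) (hseen : seen = PySem.Set.ofList pfx) :
    (∀ j, (ws.foldl wfStepB (d, seen)).1.get? j = if j ∈ pre ++ (pfx ++ ws)
        then some [((pre ++ (pfx ++ ws)).count j : Int), b j + if j ∈ pfx ++ ws then 1 else 0] else none)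
    ∧ (ws.foldl wfStepB (d, seen)).1.keys = PySem.Set.ofList (pre ++ (pfx ++ ws)) := by
  induction ws generalizing pfx d seen with
  | nil =>
      simp only [List.foldl_nil, List.append_nil]
      exact ⟨hd, hk⟩
  | cons w ws ih =>
      simp only [List.foldl_cons]
      have hcw : d.contains w = decide (w ∈ pre ++ pfx) := by
        rw [PySem.Dict.contains_eq_isSome_get?, hd w]
        by_cases h : w ∈ pre ++ pfx <;> simp [h]
      have hsw : seen.contains w = decide (w ∈ pfx) := by
        subst hseen
        by_cases h : w ∈ pfx <;> simp [PySem.Set.contains, PySem.Set.mem_ofList, h]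
      have hassoc : pfx ++ w :: ws = (pfx ++ [w]) ++ ws := by simp
      rw [hassoc]
      by_cases hwP : w ∈ pre ++ pfx
      · by_cases hwf : w ∈ pfx
        · have hstep : wfStepB (d, seen) w = (wfBump d w 0, seen) := by
            unfold wfStepB
            rw [hcw, hsw]
            simp [hwP, hwf]
          rw [hstep]
          refine ih (pfx ++ [w]) (wfBump d w 0) ?_ ?_ seen ?_
          · intro j
            rw [get?_wfBump]
            by_cases hj : j = w
            · subst hj
              rw [if_pos rfl, hd j, if_pos hwP, if_pos hwf]
              simp only [Option.map_some, bump_pair0]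
              exact (wf_at_w pre pfx j b).symm
            · rw [if_neg hj, hd j]
              exact wf_shift_ne pre pfx w j hj b
          · rw [keys_wfBump, hk, ← List.append_assoc, ofList_append_mem hwP]
          · rw [hseen, ofList_append_mem hwf]
        · have hstep : wfStepB (d, seen) w = (wfBump (wfBump d w 0) w 1, PySem.Set.add seen w) := by
            unfold wfStepB
            rw [hcw, hsw]
            simp [hwP, hwf]
          rw [hstep]
          refine ih (pfx ++ [w]) (wfBump (wfBump d w 0) w 1) ?_ ?_ (PySem.Set.add seen w) ?_
          · intro j
            by_cases hj : j = w
            · subst hj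
              rw [get?_wfBump, get?_wfBump, if_pos rfl, if_pos rfl, hd j, if_pos hwP, if_neg hwf]
              simp only [add_zero, Option.map_some, bump_pair0, bump_pair1]
              exact (wf_at_w pre pfx j b).symm
            · rw [get?_wfBump, if_neg hj, get?_wfBump, if_neg hj, hd j]
              exact wf_shift_ne pre pfx w j hj b
          · rw [keys_wfBump, keys_wfBump, hk, ← List.append_assoc, ofList_append_mem hwP]
          · rw [hseen]
            exact (ofList_append_one pfx w).symm
      · have hwf : w ∉ pfx := fun h => hwP (List.mem_append.mpr (Or.inr h))
        have hstep : wfStepB (d, seen) w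
            = (wfBump (wfBump (d.insert w [0, 0]) w 0) w 1, PySem.Set.add seen w) := by
          unfold wfStepB
          rw [hcw, hsw]
          simp [hwP, hwf]
        rw [hstep]
        refine ih (pfx ++ [w]) (wfBump (wfBump (d.insert w [0, 0]) w 0) w 1) ?_ ?_
          (PySem.Set.add seen w) ?_
        · intro j
          by_cases hj : j = w
          · subst hj
            rw [get?_wfBump, get?_wfBump, PySem.Dict.get?_insert, if_pos rfl, if_pos rfl, if_pos rfl]
            simp only [Option.map_some, bump_pair0, bump_pair1]
            refine Eq.trans ?_ (wf_at_w pre pfx j b).symm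
            have hc0 : List.count j (pre ++ pfx) = 0 := by
              rw [List.count_eq_zero]
              exact hwP
            have hb : b j = 0 := hb0 j (fun h => hwP (List.mem_append.mpr (Or.inl h)))
            rw [hc0, hb]
            norm_num
          · rw [get?_wfBump, if_neg hj, get?_wfBump, if_neg hj, PySem.Dict.get?_insert, if_neg hj,
                hd j]
            exact wf_shift_ne pre pfx w j hj b
        · rw [keys_wfBump, keys_wfBump,
              PySem.Dict.keys_insert_of_not_contains d _ (by rw [hcw]; simp [hwP]),
              hk, ← List.append_assoc, ofList_append_not_mem hwP]
        · rw [hseen]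
          exact (ofList_append_one pfx w).symm

-- B's outer loop, abstractly
theorem wf_B_outer (docs : List (List String)) (pre : List String) (b : String → Int)
    (hb0 : ∀ j, j ∉ pre → b j = 0)
    (d : PySem.Dict String (List Int))
    (hd : ∀ j, d.get? j = if j ∈ pre then some [(pre.count j : Int), b j] else none)
    (hk : d.keys = PySem.Set.ofList pre) :
    (∀ j, (docs.foldl wfDocB d).get? j = if j ∈ pre ++ docs.flatten
        then some [((pre ++ docs.flatten).count j : Int),
                   b j + (docs.countP (fun doc => decide (j ∈ doc)) : Int)] else none)
    ∧ (docs.foldl wfDocB d).keys = PySem.Set.ofList (pre ++ docs.flatten) := by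
  induction docs generalizing pre b d with
  | nil => simpa using ⟨hd, hk⟩
  | cons doc rest ih =>
      simp only [List.foldl_cons, List.flatten_cons]
      have hin := wf_B_inner doc pre b hb0 [] d
        (by intro j; simpa using hd j) (by simpa using hk) PySem.Set.empty rfl
      simp only [List.nil_append] at hin
      have hmain := ih (pre ++ doc) (fun j => b j + if j ∈ doc then 1 else 0)
        (by
          intro j hj
          rw [List.mem_append] at hj
          show b j + (if j ∈ doc then 1 else 0) = 0
          rw [hb0 j (fun h => hj (Or.inl h)), if_neg (fun h => hj (Or.inr h))]
          norm_num)
        (wfDocB d doc)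
        (by intro j; exact hin.1 j)
        hin.2
      refine ⟨?_, ?_⟩
      · intro j
        have h1 := hmain.1 j
        beta_reduce at h1
        rw [h1]
        have hm : (j ∈ pre ++ doc ++ rest.flatten) ↔ j ∈ pre ++ (doc ++ rest.flatten) := by
          simp
        have hc : List.count j (pre ++ doc ++ rest.flatten)
            = List.count j (pre ++ (doc ++ rest.flatten)) := by
          simp [List.count_append]
          try omega
        by_cases hjm : j ∈ pre ++ (doc ++ rest.flatten)
        · rw [if_pos (hm.mpr hjm), if_pos hjm, hc]
          have hcp : ((List.countP (fun doc => decide (j ∈ doc)) (doc :: rest) : Nat) : Int)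
              = (if j ∈ doc then 1 else 0)
                + (List.countP (fun doc => decide (j ∈ doc)) rest : Int) := by
            rw [List.countP_cons]
            by_cases hjd : j ∈ doc
            · simp [hjd]
              omega
            · simp [hjd]
          rw [hcp]
          have harith : (b j + if j ∈ doc then (1 : Int) else 0)
                + (List.countP (fun doc => decide (j ∈ doc)) rest : Int)
              = b j + ((if j ∈ doc then (1 : Int) else 0)
                + (List.countP (fun doc => decide (j ∈ doc)) rest : Int)) := by ring
          rw [harith]
        · rw [if_neg (fun h => hjm (hm.mp h)), if_neg hjm]
      · rw [hmain.2, List.append_assoc]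

-- the two ports, rewritten through the proof-side names
theorem wf_A_eq (x : String) :
    word_fre x
    = ((((PySem.Str.split? x "|").getD []).map PySem.Str.split₀).foldl wfDocA
        (wfInit (((PySem.Str.split? x "|").getD []).map PySem.Str.split₀).flatten)).items := by
  show (((((PySem.Str.split? x "|").getD []).foldl
      (fun (p : List (List String) × List String) part =>
        (p.1 ++ [PySem.Str.split₀ part], p.2 ++ PySem.Str.split₀ part)) ([], [])).1).foldl wfDocA
      (wfInit ((((PySem.Str.split? x "|").getD []).foldl
        (fun (p : List (List String) × List String) part =>
          (p.1 ++ [PySem.Str.split₀ part], p.2 ++ PySem.Str.split₀ part)) ([], [])).2))).items = _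
  rw [wf_firstloop]
  simp only [List.nil_append]

theorem wf_B_eq (x : String) :
    word_fre_alt x
    = ((((PySem.Str.split? x "|").getD []).map PySem.Str.split₀).foldl wfDocB
        PySem.Dict.empty).items := by
  unfold word_fre_alt wfDocB wfStepB
  rw [List.foldl_map]

-- the heart of the equivalence: over any document list the two dicts have the same items
theorem wf_main (docs : List (List String)) :
    (docs.foldl wfDocA (wfInit docs.flatten)).items
    = (docs.foldl wfDocB PySem.Dict.empty).items := by
  have hkA : (docs.foldl wfDocA (wfInit docs.flatten)).keys = PySem.Set.ofList docs.flatten := by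
    rw [keys_A_outer, wf_init_keys]
  obtain ⟨hgB, hkB⟩ := wf_B_outer docs [] (fun _ => 0) (fun _ _ => rfl) PySem.Dict.empty
    (by intro j; simp [PySem.Dict.get?_empty]) rfl
  simp only [List.nil_append] at hgB hkB
  have hgA := fun k => wf_A_outer docs docs.flatten
    (fun doc hdoc w hw => List.mem_flatten.mpr ⟨doc, hdoc, hw⟩)
    (fun k => (docs.flatten.count k : Int)) (fun _ => 0) (wfInit docs.flatten)
    (wf_init_get? docs.flatten) k
  have hnodup : (docs.foldl wfDocA (wfInit docs.flatten)).keys.Nodup := by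
    rw [hkA]; exact PySem.Set.nodup_ofList _
  have hnodupB : (docs.foldl wfDocB PySem.Dict.empty).keys.Nodup := by
    rw [hkB]; exact PySem.Set.nodup_ofList _
  rw [PySem.Dict.items_eq_map_keys _ hnodup ([] : List Int),
      PySem.Dict.items_eq_map_keys _ hnodupB ([] : List Int), hkA, hkB]
  refine List.map_congr_left ?_
  intro k _
  rw [PySem.Dict.getD_eq_get?_getD, PySem.Dict.getD_eq_get?_getD, hgA k, hgB k]

-- ===== VERDICT (by name: the statement is the Claim_ definition above) =====
theorem word_fre_spec : Claim_equal_word_fre := by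
  intro x _
  show word_fre x = word_fre_alt x
  rw [wf_A_eq, wf_B_eq]
  exact wf_main _
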